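-- pv_equiv track=rewrite | github.com/frants-jeon/baekjoon | python_solved/level_20_DivideAndConquer/baekjoon_2339.py | is_answer
-- ===== SOURCE A (Python) =====
-- def is_answer(arr):
--     jewel_cnt = 0
--     trash_cnt = 0
--     for i in range(len(arr)):
--         if arr[i].count(2) > 0:
--             jewel_cnt += arr[i].count(2)
--             if jewel_cnt > 1:
--                 break
--         if 1 in arr[i]:
--             trash_cnt += 1
--             break
--     if jewel_cnt != 1 or trash_cnt != 0:
--         return False
--     return True
-- ===== SOURCE B (Python) =====
-- def is_answer(arr):
--     freq = {}
--     for row in arr: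
--         for v in row:
--             freq[v] = freq.get(v, 0) + 1
--     return freq.get(2, 0) == 1 and freq.get(1, 0) == 0
-- ===== Notes on version B (the rewrite author's own statement) =====
-- stated objective: simpler
-- what changed: Replaced the fused early-exit scan with two counters by building one frequency table of all cell values and checking freq[2] == 1 and freq[1] == 0.
import Mathlib
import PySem

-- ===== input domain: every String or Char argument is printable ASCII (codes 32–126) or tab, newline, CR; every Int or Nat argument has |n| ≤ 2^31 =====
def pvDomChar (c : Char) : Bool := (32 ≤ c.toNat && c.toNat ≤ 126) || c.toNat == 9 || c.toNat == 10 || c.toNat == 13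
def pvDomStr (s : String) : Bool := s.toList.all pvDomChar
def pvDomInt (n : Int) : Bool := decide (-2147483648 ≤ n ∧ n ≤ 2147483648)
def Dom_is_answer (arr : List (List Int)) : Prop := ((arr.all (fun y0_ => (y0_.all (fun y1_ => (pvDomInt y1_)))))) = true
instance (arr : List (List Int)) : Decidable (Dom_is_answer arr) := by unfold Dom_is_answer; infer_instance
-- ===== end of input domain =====

-- B builds a frequency table of all cell values once and checks freq[2] == 1 and freq[1] == 0,
-- replacing A's fused early-exit scan with two running counters (objective: simpler).

-- ===== PORT A =====
-- the for-loop with its two `break`s: recursion over the rows carrying (jewel_cnt, trash_cnt)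
def pvALoop : List (List Int) → Int × Int → Int × Int
  | [], s => s
  | row :: rest, (j, t) =>
    if PySem.List.count row 2 > 0 then
      let j' := j + PySem.List.count row 2
      if j' > 1 then (j', t)                                   -- break
      else if (1 : Int) ∈ row then (j', t + 1)                 -- break
      else pvALoop rest (j', t)
    else if (1 : Int) ∈ row then (j, t + 1)                    -- break
    else pvALoop rest (j, t)

def is_answer (arr : List (List Int)) : Bool :=
  let s := pvALoop arr (0, 0)
  if s.1 ≠ 1 ∨ s.2 ≠ 0 then false else true

-- ===== PORT B =====
def is_answer_alt (arr : List (List Int)) : Bool :=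
  let freq : PySem.Dict Int Int :=
    arr.foldl (fun d row => row.foldl (fun d v => d.insert v (d.getD v 0 + 1)) d) PySem.Dict.empty
  freq.getD 2 0 == 1 && freq.getD 1 0 == 0

-- ===== PRECONDITION & SPEC =====
def Spec_is_answer (arr : List (List Int)) (out : Bool) : Prop := out = is_answer_alt arr
instance (arr : List (List Int)) (out : Bool) : Decidable (Spec_is_answer arr out) := by unfold Spec_is_answer; infer_instance

-- ===== CLAIM (what is proved, stated in full; the proofs are below) =====
def Claim_equal_is_answer : Prop := ∀ (arr : List (List Int)), Dom_is_answer arr → Spec_is_answer arr (is_answer arr)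

-- ===== LEMMAS AND PROOFS =====

-- ===== VERDICT (by name: the statement is the Claim_ definition above) =====
-- B's nested fold is the counter of the flattened grid
lemma pvB_eq_counter (arr : List (List Int)) :
    arr.foldl (fun d row => row.foldl (fun (d : PySem.Dict Int Int) v => d.insert v (d.getD v 0 + 1)) d)
      PySem.Dict.empty
      = PySem.Dict.counter arr.flatten := by
  rw [← PySem.Dict.foldl_insert_getD_add_one_eq_counter, List.foldl_flatten]

lemma pvAlt_eq (arr : List (List Int)) :
    is_answer_alt arr
      = (decide (arr.flatten.count 2 = 1) && decide (arr.flatten.count 1 = 0)) := by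
  simp only [is_answer_alt, pvB_eq_counter, PySem.Dict.getD_counter]
  congr 1 <;> · rw [Bool.eq_iff_iff]; simp only [beq_iff_eq, decide_eq_true_eq]; omega

-- invariant of A's loop: starting from (j, 0) with 0 ≤ j, the final check succeeds
-- iff j plus the total number of 2s is 1 and there is no 1 anywhere
lemma pvALoop_key (arr : List (List Int)) (j : Int) (hj : 0 ≤ j) :
    ((pvALoop arr (j, 0)).1 = 1 ∧ (pvALoop arr (j, 0)).2 = 0)
      ↔ (j + (arr.flatten.count 2 : Int) = 1 ∧ arr.flatten.count 1 = 0) := by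
  induction arr generalizing j with
  | nil => simp [pvALoop]
  | cons row rest ih =>
    simp only [pvALoop, PySem.List.count_eq, List.flatten_cons, List.count_append]
    split_ifs with h2 hbig h1 h1
    · dsimp only; push_cast; omega
    · have : 0 < List.count 1 row := List.count_pos_iff.mpr h1
      dsimp only; norm_num; omega
    · have hr1 : List.count 1 row = 0 := List.count_eq_zero.mpr h1
      rw [ih _ (by omega)]
      push_cast; omega
    · have : 0 < List.count 1 row := List.count_pos_iff.mpr h1
      dsimp only; norm_num; omega
    · have hr1 : List.count 1 row = 0 := List.count_eq_zero.mpr h1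
      have hc2 : List.count 2 row = 0 := by omega
      rw [ih j hj]
      push_cast; omega

theorem is_answer_spec : Claim_equal_is_answer := by
  intro arr _
  unfold Spec_is_answer
  rw [Bool.eq_iff_iff, pvAlt_eq]
  have h := pvALoop_key arr 0 le_rfl
  simp only [zero_add] at h
  simp only [is_answer, Bool.and_eq_true, decide_eq_true_eq]
  split_ifs with hcond
  · simp only [false_iff, not_and]
    intro hc1 hc2
    have hb := h.mpr ⟨by exact_mod_cast hc1, hc2⟩
    rcases hcond with hc | hc
    · exact hc hb.1
    · exact hc hb.2
  · simp only [not_or, not_not] at hcond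
    have hb := h.mp ⟨hcond.1, hcond.2⟩
    simp only [true_iff]
    exact ⟨by exact_mod_cast hb.1, hb.2⟩
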